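-- pv_equiv track=rewrite | github.com/andreaTufo/FootballBettingDetectionSystem | algorithm.py | get_num_of_shots
-- ===== SOURCE A (Python) =====
-- def get_shot_type(position):
--     if position == '3' or position == '10' or position == '12' or position == '13' or position == '14':
--         return 3
--
--     if position == '7' or position == '8' or position == '9' or position == '11' or position == '15':
--         return 2
--
--     if position != "'" and position != "," and position != "[" and position != "]" and position != " " and position != "":
--         return 1
--
-- def get_num_of_shots(location):
--
--     type_3=0
--     type_2=0
--     type_1=0
--
--     for pos in location:
--         shot_type = get_shot_type(pos)
--
--         if shot_type == 3:
--             type_3 += 1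
--         elif shot_type == 2:
--             type_2 += 1
--         elif shot_type == 1:
--             type_1 += 1
--
--
--     return (type_3, type_2, type_1)
-- ===== SOURCE B (Python) =====
-- SET3 = {'3', '10', '12', '13', '14'}
-- SET2 = {'7', '8', '9', '11', '15'}
-- SKIP = {"'", ",", "[", "]", " ", ""}
--
-- def get_num_of_shots(location):
--     type_3 = sum(1 for p in location if p in SET3)
--     type_2 = sum(1 for p in location if p in SET2)
--     type_1 = sum(1 for p in location
--                  if p not in SET3 and p not in SET2 and p not in SKIP)
--     return (type_3, type_2, type_1)
-- ===== Notes on version B (the rewrite author's own statement) =====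
-- stated objective: alternative
-- what changed: Replaced the single classifying pass through the branch-dispatch helper get_shot_type with three independent filtered tallies over the string, each a set-membership count.
import Mathlib
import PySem

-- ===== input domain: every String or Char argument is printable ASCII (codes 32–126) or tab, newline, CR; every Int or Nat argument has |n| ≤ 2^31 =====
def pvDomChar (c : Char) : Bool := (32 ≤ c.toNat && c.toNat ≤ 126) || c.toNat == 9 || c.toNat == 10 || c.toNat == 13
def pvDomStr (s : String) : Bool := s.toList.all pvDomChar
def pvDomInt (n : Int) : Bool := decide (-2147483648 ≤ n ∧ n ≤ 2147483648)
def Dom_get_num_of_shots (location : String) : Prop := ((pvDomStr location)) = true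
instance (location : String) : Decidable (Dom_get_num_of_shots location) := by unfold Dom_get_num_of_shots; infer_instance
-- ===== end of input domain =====

-- B replaces A's single classifying pass through a branch-dispatch helper with three
-- independent set-membership tallies over the string (alternative decomposition, same cost).

-- ===== PORT A =====
-- get_shot_type: returns some 3 / some 2 / some 1, or none (Python's implicit None) when no branch fires
def get_shot_type (position : String) : Option Int :=
  if position == "3" || position == "10" || position == "12" || position == "13" || position == "14" then
    some 3
  else if position == "7" || position == "8" || position == "9" || position == "11" || position == "15" then
    some 2
  else if position != "'" && position != "," && position != "[" && position != "]" && position != " " && position != "" then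
    some 1
  else
    none

def get_num_of_shots (location : String) : Int × Int × Int :=
  location.toList.foldl
    (fun (st : Int × Int × Int) pos =>
      let shot_type := get_shot_type (String.singleton pos)
      if shot_type == some 3 then (st.1 + 1, st.2.1, st.2.2)
      else if shot_type == some 2 then (st.1, st.2.1 + 1, st.2.2)
      else if shot_type == some 1 then (st.1, st.2.1, st.2.2 + 1)
      else st)
    (0, 0, 0)

-- ===== PORT B =====
def pvSET3 : List String := ["3", "10", "12", "13", "14"]
def pvSET2 : List String := ["7", "8", "9", "11", "15"]
def pvSKIP : List String := ["'", ",", "[", "]", " ", ""]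

def get_num_of_shots_alt (location : String) : Int × Int × Int :=
  let cs := location.toList
  let type_3 : Int := (cs.filter (fun p => pvSET3.contains (String.singleton p))).length
  let type_2 : Int := (cs.filter (fun p => pvSET2.contains (String.singleton p))).length
  let type_1 : Int := (cs.filter (fun p =>
      !pvSET3.contains (String.singleton p) && !pvSET2.contains (String.singleton p)
        && !pvSKIP.contains (String.singleton p))).length
  (type_3, type_2, type_1)

-- ===== PRECONDITION & SPEC =====
def Spec_get_num_of_shots (location : String) (out : Int × Int × Int) : Prop := out = get_num_of_shots_alt location
instance (location : String) (out : Int × Int × Int) : Decidable (Spec_get_num_of_shots location out) := by unfold Spec_get_num_of_shots; infer_instance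

-- ===== CLAIM (what is proved, stated in full; the proofs are below) =====
def Claim_equal_get_num_of_shots : Prop := ∀ (location : String), Dom_get_num_of_shots location → Spec_get_num_of_shots location (get_num_of_shots location)

-- ===== LEMMAS AND PROOFS =====

lemma sing_eq_sing {c d : Char} : String.singleton c = String.singleton d ↔ c = d := by
  constructor
  · intro h; have := congrArg String.toList h; simpa [String.singleton] using this
  · rintro rfl; rfl

lemma sing_beq_one (c d : Char) : (String.singleton c == String.singleton d) = (c == d) := by
  rw [beq_eq_beq]; exact sing_eq_sing

lemma sing_ne_two (c a b : Char) : (String.singleton c == String.ofList [a, b]) = false := by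
  rw [beq_eq_false_iff_ne]
  intro h; have := congrArg String.toList h; simp [String.singleton] at this

lemma sing_ne_empty (c : Char) : (String.singleton c == "") = false := by
  rw [beq_eq_false_iff_ne]
  intro h; have := congrArg String.toList h; simp [String.singleton] at this

lemma mem3_char (c : Char) : pvSET3.contains (String.singleton c) = (c == '3') := by
  rw [show pvSET3 = [String.singleton '3', String.ofList ['1','0'], String.ofList ['1','2'],
    String.ofList ['1','3'], String.ofList ['1','4']] from rfl]
  simp only [List.contains_cons, List.contains_nil, sing_beq_one, sing_ne_two, Bool.or_false]

lemma mem2_char (c : Char) :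
    pvSET2.contains (String.singleton c) = (c == '7' || c == '8' || c == '9') := by
  rw [show pvSET2 = [String.singleton '7', String.singleton '8', String.singleton '9',
    String.ofList ['1','1'], String.ofList ['1','5']] from rfl]
  simp only [List.contains_cons, List.contains_nil, sing_beq_one, sing_ne_two, Bool.or_false,
    Bool.or_assoc]

lemma memSkip_char (c : Char) :
    pvSKIP.contains (String.singleton c)
      = (c == '\'' || c == ',' || c == '[' || c == ']' || c == ' ') := by
  rw [show pvSKIP = [String.singleton '\'', String.singleton ',', String.singleton '[',
    String.singleton ']', String.singleton ' ', ""] from rfl]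
  simp only [List.contains_cons, List.contains_nil, sing_beq_one, sing_ne_empty, Bool.or_false,
    Bool.or_assoc]

lemma shot_char (c : Char) :
    get_shot_type (String.singleton c) =
      if c == '3' then some 3
      else if c == '7' || c == '8' || c == '9' then some 2
      else if !(c == '\'') && !(c == ',') && !(c == '[') && !(c == ']') && !(c == ' ') then some 1
      else none := by
  unfold get_shot_type
  rw [show ("3" : String) = String.singleton '3' from rfl,
      show ("10" : String) = String.ofList ['1','0'] from rfl,
      show ("12" : String) = String.ofList ['1','2'] from rfl,
      show ("13" : String) = String.ofList ['1','3'] from rfl,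
      show ("14" : String) = String.ofList ['1','4'] from rfl,
      show ("7" : String) = String.singleton '7' from rfl,
      show ("8" : String) = String.singleton '8' from rfl,
      show ("9" : String) = String.singleton '9' from rfl,
      show ("11" : String) = String.ofList ['1','1'] from rfl,
      show ("15" : String) = String.ofList ['1','5'] from rfl,
      show ("'" : String) = String.singleton '\'' from rfl,
      show ("," : String) = String.singleton ',' from rfl,
      show ("[" : String) = String.singleton '[' from rfl,
      show ("]" : String) = String.singleton ']' from rfl,
      show (" " : String) = String.singleton ' ' from rfl]
  simp only [sing_beq_one, sing_ne_two, sing_ne_empty, bne, Bool.or_false, Bool.not_false,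
    Bool.and_true]

lemma fold_counts (cs : List Char) (a : Int × Int × Int) :
    cs.foldl
      (fun (st : Int × Int × Int) pos =>
        let shot_type := get_shot_type (String.singleton pos)
        if shot_type == some 3 then (st.1 + 1, st.2.1, st.2.2)
        else if shot_type == some 2 then (st.1, st.2.1 + 1, st.2.2)
        else if shot_type == some 1 then (st.1, st.2.1, st.2.2 + 1)
        else st) a
    = (a.1 + ((cs.filter (fun p => pvSET3.contains (String.singleton p))).length : Int),
       a.2.1 + ((cs.filter (fun p => pvSET2.contains (String.singleton p))).length : Int),
       a.2.2 + ((cs.filter (fun p =>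
          !pvSET3.contains (String.singleton p) && !pvSET2.contains (String.singleton p)
            && !pvSKIP.contains (String.singleton p))).length : Int)) := by
  induction cs generalizing a with
  | nil => simp
  | cons c cs ih =>
    rw [List.foldl_cons, ih]
    simp only [List.filter_cons]
    rw [shot_char c, mem3_char c, mem2_char c, memSkip_char c]
    by_cases e3 : c = '3'
    · subst e3; simp; omega
    by_cases e7 : c = '7'
    · subst e7; simp; omega
    by_cases e8 : c = '8'
    · subst e8; simp; omega
    by_cases e9 : c = '9'
    · subst e9; simp; omega
    by_cases ea : c = '\''
    · subst ea; simp
    by_cases eb : c = ','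
    · subst eb; simp
    by_cases ec : c = '['
    · subst ec; simp
    by_cases ed : c = ']'
    · subst ed; simp
    by_cases ee : c = ' '
    · subst ee; simp
    simp [e3, e7, e8, e9, ea, eb, ec, ed, ee, Prod.ext_iff]
    all_goals omega

-- ===== VERDICT (by name: the statement is the Claim_ definition above) =====
theorem get_num_of_shots_spec : Claim_equal_get_num_of_shots := by
  intro location _
  unfold Spec_get_num_of_shots get_num_of_shots get_num_of_shots_alt
  rw [fold_counts]
  simp
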